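-- pv_equiv track=rewrite | github.com/happyCoVid-19/PS | hongcheol/달팽이.py | solution
-- ===== SOURCE A (Python) =====
-- def solution(n):
--     matrix = [[0 for _ in range(n)] for _ in range(n)]#2차원배열
--     y, x = -1, 0
--     count = 1
--
--     for i in range(n):
--         for j in range(i, n):
--             if(i % 3 == 0):   #아래로
--                 y += 1
--             elif(i % 3 == 1):  #오른쪽으로
--                 x += 1
--             else:
--                 y -= 1 #대각선으로 올렷
--                 x -= 1
--             matrix[y][x] = count
--             count += 1
--
--     answer = []
--     for i in range(n):
--         for j in range(n):
--             if(matrix[i][j]!=0):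
--                 answer.append(matrix[i][j])
--
--     return answer
-- ===== SOURCE B (Python) =====
-- def solution(n):
--     # Same snail walk, but leg-at-a-time: each leg is emitted as a whole
--     # (closed-form positions), collected as (row, col, value) triples,
--     # then sorted by (row, col) -- no dense n x n matrix, no full-grid scan.
--     placements = []
--     y, x, c = -1, 0, 1
--     for i in range(n):
--         m = n - i
--         if i % 3 == 0:
--             placements += [(y + t, x, c + t - 1) for t in range(1, m + 1)]
--             y += m
--         elif i % 3 == 1:
--             placements += [(y, x + t, c + t - 1) for t in range(1, m + 1)]
--             x += m
--         else:
--             placements += [(y - t, x - t, c + t - 1) for t in range(1, m + 1)]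
--             y -= m
--             x -= m
--         c += m
--     placements.sort(key=lambda t: t[0] * n + t[1])  # flat row-major index (0 <= col <= row < n)
--     return [v for _, _, v in placements]
-- ===== Notes on version B (the rewrite author's own statement) =====
-- stated objective: alternative
-- what changed: B drops the dense n x n matrix and the full-grid nonzero scan: it emits each snail leg as a whole in closed form as (row, col, value) triples, then sorts the triples by flat row-major index and returns their values.
import Mathlib
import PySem

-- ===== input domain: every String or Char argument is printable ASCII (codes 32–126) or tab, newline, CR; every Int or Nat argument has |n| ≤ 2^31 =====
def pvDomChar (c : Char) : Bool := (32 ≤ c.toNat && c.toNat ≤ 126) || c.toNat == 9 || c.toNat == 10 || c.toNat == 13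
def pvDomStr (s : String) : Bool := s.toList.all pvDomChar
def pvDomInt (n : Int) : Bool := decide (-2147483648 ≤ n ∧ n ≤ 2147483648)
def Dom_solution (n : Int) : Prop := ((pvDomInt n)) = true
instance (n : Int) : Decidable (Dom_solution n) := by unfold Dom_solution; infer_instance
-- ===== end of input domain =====

-- B replaces A's dense n×n matrix and full-grid nonzero scan by a list of per-leg
-- (row, col, value) triples emitted in closed form and sorted by flat row-major index
-- (alternative algorithm, not claimed faster).

-- ===== PORT A =====
-- helper for the assignment  matrix[y][x] = count  (indices are in range throughout
-- the walk, proved below; pyGetD's default row [] is never used)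
def writeA (m : List (List Int)) (t : Int × Int × Int) : List (List Int) :=
  PySem.List.pySetD m t.1 (PySem.List.pySetD (PySem.List.pyGetD m t.1 []) t.2.1 t.2.2)

-- the if/elif/else update of y (resp. x) on i % 3
def snailStepY (d y : Int) : Int := if d = 0 then y + 1 else if d = 1 then y else y - 1
def snailStepX (d x : Int) : Int := if d = 0 then x else if d = 1 then x + 1 else x - 1

def solution (n : Int) : List Int :=
  let matrix : List (List Int) :=
    (PySem.List.pyRange 0 n).map (fun _ => (PySem.List.pyRange 0 n).map (fun _ => (0 : Int)))
  let st :=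
    (PySem.List.pyRange 0 n).foldl
      (fun (s : List (List Int) × Int × Int × Int) (i : Int) =>
        (PySem.List.pyRange i n).foldl
          (fun (t : List (List Int) × Int × Int × Int) (_j : Int) =>
            (writeA t.1 (snailStepY (PySem.Int.mod i 3) t.2.1,
                         snailStepX (PySem.Int.mod i 3) t.2.2.1, t.2.2.2),
             snailStepY (PySem.Int.mod i 3) t.2.1,
             snailStepX (PySem.Int.mod i 3) t.2.2.1, t.2.2.2 + 1))
          s)
      (matrix, -1, 0, 1)
  (PySem.List.pyRange 0 n).foldl
    (fun acc i =>
      (PySem.List.pyRange 0 n).foldl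
        (fun acc j =>
          if PySem.List.pyGetD (PySem.List.pyGetD st.1 i []) j 0 ≠ 0 then
            acc ++ [PySem.List.pyGetD (PySem.List.pyGetD st.1 i []) j 0]
          else acc)
        acc)
    []

-- ===== PORT B =====
def solution_alt (n : Int) : List Int :=
  let st :=
    (PySem.List.pyRange 0 n).foldl
      (fun (s : List (Int × Int × Int) × Int × Int × Int) (i : Int) =>
        if PySem.Int.mod i 3 = 0 then
          (s.1 ++ (PySem.List.pyRange 1 (n - i + 1)).map
              (fun t => (s.2.1 + t, s.2.2.1, s.2.2.2 + t - 1)),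
           s.2.1 + (n - i), s.2.2.1, s.2.2.2 + (n - i))
        else if PySem.Int.mod i 3 = 1 then
          (s.1 ++ (PySem.List.pyRange 1 (n - i + 1)).map
              (fun t => (s.2.1, s.2.2.1 + t, s.2.2.2 + t - 1)),
           s.2.1, s.2.2.1 + (n - i), s.2.2.2 + (n - i))
        else
          (s.1 ++ (PySem.List.pyRange 1 (n - i + 1)).map
              (fun t => (s.2.1 - t, s.2.2.1 - t, s.2.2.2 + t - 1)),
           s.2.1 - (n - i), s.2.2.1 - (n - i), s.2.2.2 + (n - i)))
      ([], -1, 0, 1)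
  (PySem.List.sorted st.1 (fun t => t.1 * n + t.2.1)).map (fun t => t.2.2)

-- ===== PRECONDITION & SPEC =====
def Spec_solution (n : Int) (out : List Int) : Prop := out = solution_alt n
instance (n : Int) (out : List Int) : Decidable (Spec_solution n out) := by unfold Spec_solution; infer_instance

-- ===== CLAIM (what is proved, stated in full; the proofs are below) =====
def Claim_equal_solution : Prop := ∀ (n : Int), Dom_solution n → Spec_solution n (solution n)

-- ===== LEMMAS AND PROOFS =====

-- the common snail walk, leg by leg (proof model)
def legD (d : Int) : Nat → Int → Int → Int → List (Int × Int × Int)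
  | 0, _, _, _ => []
  | Nat.succ k, y, x, c =>
    (snailStepY d y, snailStepX d x, c) :: legD d k (snailStepY d y) (snailStepX d x) (c + 1)

def endYv (d m y : Int) : Int := if d = 0 then y + m else if d = 1 then y else y - m
def endXv (d m x : Int) : Int := if d = 0 then x else if d = 1 then x + m else x - m

def snail : Nat → Int → Int → Int → Int → List (Int × Int × Int)
  | 0, _, _, _, _ => []
  | Nat.succ k, i, y, x, c =>
    legD (PySem.Int.mod i 3) (k + 1) y x c ++
    snail k (i + 1) (endYv (PySem.Int.mod i 3) ((k : Int) + 1) y)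
      (endXv (PySem.Int.mod i 3) ((k : Int) + 1) x) (c + ((k : Int) + 1))

def kfind (S : List (Int × Int × Int)) (r c : Int) : Option (Int × Int × Int) :=
  S.find? (fun t => t.1 == r && t.2.1 == c)

def look (S : List (Int × Int × Int)) (r c : Int) : Int :=
  ((kfind S r c).map (fun t => t.2.2)).getD 0

def entry (M : List (List Int)) (r c : Int) : Int :=
  PySem.List.pyGetD (PySem.List.pyGetD M r []) c 0

-- closed forms of the three legs
theorem legD_zero (k : Nat) : ∀ (y x c : Int), legD 0 k y x c =
    (List.range k).map (fun (t : Nat) => (y + 1 + (t : Int), x, c + (t : Int))) := by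
  induction k with
  | zero => intro y x c; simp [legD]
  | succ k ih =>
    intro y x c
    rw [List.range_succ_eq_map]
    simp only [legD, snailStepY, snailStepX, List.map_cons, List.map_map, ih]
    norm_num
    intro a _
    omega

theorem legD_one (k : Nat) : ∀ (y x c : Int), legD 1 k y x c =
    (List.range k).map (fun (t : Nat) => (y, x + 1 + (t : Int), c + (t : Int))) := by
  induction k with
  | zero => intro y x c; simp [legD]
  | succ k ih =>
    intro y x c
    rw [List.range_succ_eq_map]
    simp only [legD, snailStepY, snailStepX, List.map_cons, List.map_map, ih]
    norm_num
    intro a _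
    omega

theorem legD_two (k : Nat) : ∀ (y x c : Int), legD 2 k y x c =
    (List.range k).map (fun (t : Nat) => (y - 1 - (t : Int), x - 1 - (t : Int), c + (t : Int))) := by
  induction k with
  | zero => intro y x c; simp [legD]
  | succ k ih =>
    intro y x c
    rw [List.range_succ_eq_map]
    simp only [legD, snailStepY, snailStepX, List.map_cons, List.map_map, ih]
    norm_num
    intro a _
    omega

-- A's inner loop performs one leg of writes
theorem A_inner (d : Int) (js : List Int) : ∀ (M : List (List Int)) (y x c : Int),
    js.foldl
      (fun (t : List (List Int) × Int × Int × Int) (_j : Int) =>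
        (writeA t.1 (snailStepY d t.2.1, snailStepX d t.2.2.1, t.2.2.2),
         snailStepY d t.2.1, snailStepX d t.2.2.1, t.2.2.2 + 1))
      (M, y, x, c)
    = (List.foldl writeA M (legD d js.length y x c),
       endYv d (js.length : Int) y, endXv d (js.length : Int) x, c + (js.length : Int)) := by
  induction js with
  | nil => intro M y x c; simp [legD, endYv, endXv]
  | cons j js ih =>
    intro M y x c
    simp only [List.foldl_cons]
    rw [ih]
    have hB : endYv d (js.length : Int) (snailStepY d y) = endYv d ((j :: js).length : Int) y := by
      simp only [endYv, snailStepY, List.length_cons]; push_cast; split_ifs <;> ring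
    have hC : endXv d (js.length : Int) (snailStepX d x) = endXv d ((j :: js).length : Int) x := by
      simp only [endXv, snailStepX, List.length_cons]; push_cast; split_ifs <;> ring
    have hD : c + 1 + (js.length : Int) = c + ((j :: js).length : Int) := by
      simp only [List.length_cons]; push_cast; ring
    have hA : List.foldl writeA (writeA M (snailStepY d y, snailStepX d x, c))
        (legD d js.length (snailStepY d y) (snailStepX d x) (c + 1))
        = List.foldl writeA M (legD d (j :: js).length y x c) := by
      simp only [List.length_cons, legD, List.foldl_cons]
    exact congrArg₂ Prod.mk hA (congrArg₂ Prod.mk hB (congrArg₂ Prod.mk hC hD))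

-- A's outer loop performs the whole snail of writes
theorem A_outer (n : Int) : ∀ (K : Nat), ∀ (i : Int), K = (n - i).toNat →
    ∀ (M : List (List Int)) (y x c : Int),
    ∃ e : Int × Int × Int,
    (PySem.List.pyRange i n).foldl
      (fun (s : List (List Int) × Int × Int × Int) (i : Int) =>
        (PySem.List.pyRange i n).foldl
          (fun (t : List (List Int) × Int × Int × Int) (_j : Int) =>
            (writeA t.1 (snailStepY (PySem.Int.mod i 3) t.2.1,
                         snailStepX (PySem.Int.mod i 3) t.2.2.1, t.2.2.2),
             snailStepY (PySem.Int.mod i 3) t.2.1,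
             snailStepX (PySem.Int.mod i 3) t.2.2.1, t.2.2.2 + 1))
          s)
      (M, y, x, c)
    = (List.foldl writeA M (snail K i y x c), e) := by
  intro K
  induction K with
  | zero =>
    intro i h M y x c
    exact ⟨(y, x, c), by rw [PySem.List.pyRange_one_eq_nil (by omega)]; simp [snail]⟩
  | succ K ih =>
    intro i h M y x c
    have hin : i < n := by omega
    rw [PySem.List.pyRange_one_cons hin]
    simp only [List.foldl_cons]
    rw [A_inner]
    have hlen : ((PySem.List.pyRange i n).length : Int) = (K : Int) + 1 := by
      rw [PySem.List.length_pyRange_one]; omega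
    have hlen' : (PySem.List.pyRange i n).length = K + 1 := by
      rw [PySem.List.length_pyRange_one]; omega
    rw [hlen, hlen']
    obtain ⟨e, he⟩ := ih (i + 1) (by omega)
      (List.foldl writeA M (legD (PySem.Int.mod i 3) (K + 1) y x c))
      (endYv (PySem.Int.mod i 3) ((K : Int) + 1) y)
      (endXv (PySem.Int.mod i 3) ((K : Int) + 1) x) (c + ((K : Int) + 1))
    refine ⟨e, ?_⟩
    rw [he]
    simp only [snail]
    rw [List.foldl_append]

-- B's outer loop emits the whole snail as triples
theorem B_outer (n : Int) : ∀ (K : Nat), ∀ (i : Int), K = (n - i).toNat →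
    ∀ (l : List (Int × Int × Int)) (y x c : Int),
    ∃ e : Int × Int × Int,
    (PySem.List.pyRange i n).foldl
      (fun (s : List (Int × Int × Int) × Int × Int × Int) (i : Int) =>
        if PySem.Int.mod i 3 = 0 then
          (s.1 ++ (PySem.List.pyRange 1 (n - i + 1)).map
              (fun t => (s.2.1 + t, s.2.2.1, s.2.2.2 + t - 1)),
           s.2.1 + (n - i), s.2.2.1, s.2.2.2 + (n - i))
        else if PySem.Int.mod i 3 = 1 then
          (s.1 ++ (PySem.List.pyRange 1 (n - i + 1)).map
              (fun t => (s.2.1, s.2.2.1 + t, s.2.2.2 + t - 1)),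
           s.2.1, s.2.2.1 + (n - i), s.2.2.2 + (n - i))
        else
          (s.1 ++ (PySem.List.pyRange 1 (n - i + 1)).map
              (fun t => (s.2.1 - t, s.2.2.1 - t, s.2.2.2 + t - 1)),
           s.2.1 - (n - i), s.2.2.1 - (n - i), s.2.2.2 + (n - i)))
      (l, y, x, c)
    = (l ++ snail K i y x c, e) := by
  intro K
  induction K with
  | zero =>
    intro i h l y x c
    exact ⟨(y, x, c), by rw [PySem.List.pyRange_one_eq_nil (by omega)]; simp [snail]⟩
  | succ K ih =>
    intro i h l y x c
    have hin : i < n := by omega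
    have hni : n - i = (K : Int) + 1 := by omega
    have hleg0 : (PySem.List.pyRange 1 (n - i + 1)).map
        (fun t => (y + t, x, c + t - 1)) = legD 0 (K + 1) y x c := by
      rw [PySem.List.pyRange_one, List.map_map, legD_zero]
      have h1 : (n - i + 1 - 1).toNat = K + 1 := by omega
      rw [h1]
      apply List.map_congr_left
      intro a _
      simp [Function.comp, Prod.ext_iff]
      omega
    have hleg1 : (PySem.List.pyRange 1 (n - i + 1)).map
        (fun t => (y, x + t, c + t - 1)) = legD 1 (K + 1) y x c := by
      rw [PySem.List.pyRange_one, List.map_map, legD_one]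
      have h1 : (n - i + 1 - 1).toNat = K + 1 := by omega
      rw [h1]
      apply List.map_congr_left
      intro a _
      simp [Function.comp, Prod.ext_iff]
      omega
    have hleg2 : (PySem.List.pyRange 1 (n - i + 1)).map
        (fun t => (y - t, x - t, c + t - 1)) = legD 2 (K + 1) y x c := by
      rw [PySem.List.pyRange_one, List.map_map, legD_two]
      have h1 : (n - i + 1 - 1).toNat = K + 1 := by omega
      rw [h1]
      apply List.map_congr_left
      intro a _
      simp [Function.comp, Prod.ext_iff]
      omega
    rw [PySem.List.pyRange_one_cons hin]
    simp only [List.foldl_cons]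
    split_ifs with h3a h3b
    · rw [hleg0, hni]
      obtain ⟨e, he⟩ := ih (i + 1) (by omega) (l ++ legD 0 (K + 1) y x c)
        (y + ((K : Int) + 1)) x (c + ((K : Int) + 1))
      refine ⟨e, ?_⟩
      rw [he]
      simp only [snail, h3a, endYv, endXv, List.append_assoc, reduceIte]
    · rw [hleg1, hni]
      obtain ⟨e, he⟩ := ih (i + 1) (by omega) (l ++ legD 1 (K + 1) y x c)
        y (x + ((K : Int) + 1)) (c + ((K : Int) + 1))
      refine ⟨e, ?_⟩
      rw [he]
      simp only [snail, h3b, endYv, endXv, List.append_assoc, reduceIte]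
      norm_num
    · have h3c : PySem.Int.mod i 3 = 2 := by
        have h1 := PySem.Int.mod_nonneg i (b := 3) (by norm_num)
        have h2 := PySem.Int.mod_lt i (b := 3) (by norm_num)
        omega
      rw [hleg2, hni]
      obtain ⟨e, he⟩ := ih (i + 1) (by omega) (l ++ legD 2 (K + 1) y x c)
        (y - ((K : Int) + 1)) (x - ((K : Int) + 1)) (c + ((K : Int) + 1))
      refine ⟨e, ?_⟩
      rw [he]
      simp only [snail, h3c, endYv, endXv, List.append_assoc]
      norm_num

-- direction index only matters mod 3
theorem snail_shift3 : ∀ (k : Nat) (i y x c : Int),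
    snail k (i + 3) y x c = snail k i y x c := by
  intro k
  induction k with
  | zero => intro i y x c; simp [snail]
  | succ k ih =>
    intro i y x c
    have hm : PySem.Int.mod (i + 3) 3 = PySem.Int.mod i 3 := by
      rw [PySem.Int.mod_eq_emod_of_pos (by norm_num), PySem.Int.mod_eq_emod_of_pos (by norm_num)]
      omega
    simp only [snail, hm]
    rw [show i + 3 + 1 = (i + 1) + 3 by ring, ih]

-- the walk is translation-equivariant
theorem legD_shift (d : Int) : ∀ (k : Nat) (y x c a b e : Int),
    legD d k (y + a) (x + b) (c + e) =
      (legD d k y x c).map (fun t => (t.1 + a, t.2.1 + b, t.2.2 + e)) := by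
  intro k
  induction k with
  | zero => intro y x c a b e; simp [legD]
  | succ k ih =>
    intro y x c a b e
    have hY : snailStepY d (y + a) = snailStepY d y + a := by
      simp only [snailStepY]; split_ifs <;> ring
    have hX : snailStepX d (x + b) = snailStepX d x + b := by
      simp only [snailStepX]; split_ifs <;> ring
    simp only [legD, List.map_cons, hY, hX]
    refine congrArg₂ _ rfl ?_
    rw [show c + e + 1 = (c + 1) + e by ring, ih]

theorem snail_shift : ∀ (k : Nat) (i y x c a b e : Int),
    snail k i (y + a) (x + b) (c + e) =
      (snail k i y x c).map (fun t => (t.1 + a, t.2.1 + b, t.2.2 + e)) := by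
  intro k
  induction k with
  | zero => intro i y x c a b e; simp [snail]
  | succ k ih =>
    intro i y x c a b e
    have hY : ∀ m y, endYv (PySem.Int.mod i 3) m (y + a) = endYv (PySem.Int.mod i 3) m y + a := by
      intro m y; simp only [endYv]; split_ifs <;> ring
    have hX : ∀ m x, endXv (PySem.Int.mod i 3) m (x + b) = endXv (PySem.Int.mod i 3) m x + b := by
      intro m x; simp only [endXv]; split_ifs <;> ring
    simp only [snail, List.map_append, legD_shift, hY, hX]
    refine congrArg₂ _ rfl ?_
    rw [show c + e + ((k : Int) + 1) = (c + ((k : Int) + 1)) + e by ring, ih]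

-- the snail visits exactly once cells of the lower triangle, with positive values
theorem snail_inv (k : Nat) :
    (∀ t ∈ snail k 0 (-1) 0 1, 0 ≤ t.2.1 ∧ t.2.1 ≤ t.1 ∧ t.1 < (k : Int) ∧ 1 ≤ t.2.2) ∧
    (snail k 0 (-1) 0 1).Pairwise (fun a b => (a.1, a.2.1) ≠ (b.1, b.2.1)) := by
  induction k using Nat.strong_induction_on with
  | _ k ih =>
    match k with
    | 0 => refine ⟨by simp [snail], by simp [snail]⟩
    | 1 => decide
    | 2 => decide
    | (m + 3) =>
      have hT : snail m 3 1 1 (3 * (m : Int) + 7)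
          = (snail m 0 (-1) 0 1).map (fun t => (t.1 + 2, t.2.1 + 1, t.2.2 + (3 * (m : Int) + 6))) := by
        have h1 := snail_shift3 m 0 1 1 (3 * (m : Int) + 7)
        norm_num at h1
        have h2 := snail_shift m 0 (-1) 0 1 2 1 (3 * (m : Int) + 6)
        norm_num at h2
        rw [h1, show 3 * (m : Int) + 7 = 1 + (3 * (m : Int) + 6) by ring, h2]
      have hU : snail (m + 3) 0 (-1) 0 1 =
          legD 0 (m + 3) (-1) 0 1 ++
            (legD 1 (m + 2) ((m : Int) + 2) 0 ((m : Int) + 4) ++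
             (legD 2 (m + 1) ((m : Int) + 2) ((m : Int) + 2) (2 * (m : Int) + 6) ++
              (snail m 0 (-1) 0 1).map (fun t => (t.1 + 2, t.2.1 + 1, t.2.2 + (3 * (m : Int) + 6))))) := by
        rw [← hT]
        simp only [snail]
        norm_num [endYv, endXv]
        have n1 : m + 1 + 1 = m + 2 := by omega
        have n5 : 1 + ((m : Int) + 2 + 1) + ((m : Int) + 1 + 1) + ((m : Int) + 1) = 3 * (m : Int) + 7 := by ring
        have n4 : 1 + ((m : Int) + 2 + 1) + ((m : Int) + 1 + 1) = 2 * (m : Int) + 6 := by ring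
        have n3 : (m : Int) + 1 + 1 = (m : Int) + 2 := by ring
        have n2 : 1 + ((m : Int) + 2 + 1) = (m : Int) + 4 := by ring
        rw [n5, n4, n3, n2, n1]
      obtain ⟨ihb, ihp⟩ := ih m (by omega)
      constructor
      · intro t ht
        rw [hU] at ht
        simp only [List.mem_append, legD_zero, legD_one, legD_two, List.mem_map,
          List.mem_range] at ht
        rcases ht with ⟨a, ha, rfl⟩ | ⟨a, ha, rfl⟩ | ⟨a, ha, rfl⟩ | ⟨u, hu, rfl⟩
        · simp; omega
        · simp; omega
        · simp; omega
        · obtain ⟨h1, h2, h3, h4⟩ := ihb u hu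
          simp
          omega
      · rw [hU]
        have hpw1 : ∀ (d : Nat) (f : Nat → Int × Int × Int),
            (∀ a b : Nat, a < b → (f a).1 ≠ (f b).1 ∨ (f a).2.1 ≠ (f b).2.1) →
            ((List.range d).map f).Pairwise (fun a b => (a.1, a.2.1) ≠ (b.1, b.2.1)) := by
          intro d f hf
          refine List.pairwise_map.mpr (List.pairwise_lt_range.imp ?_)
          intro a b hab
          rcases hf a b hab with h | h <;> simp [ne_eq, Prod.ext_iff] <;> tauto
        simp only [List.pairwise_append]
        refine ⟨?_, ⟨?_, ⟨?_, ?_, ?_⟩, ?_⟩, ?_⟩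
        · rw [legD_zero]; exact hpw1 _ _ (by intro a b hab; left; simp only [ne_eq]; push_cast; omega)
        · rw [legD_one]; exact hpw1 _ _ (by intro a b hab; right; simp only [ne_eq]; push_cast; omega)
        · rw [legD_two]; exact hpw1 _ _ (by intro a b hab; left; simp only [ne_eq]; omega)
        · refine List.pairwise_map.mpr (ihp.imp ?_)
          intro a b hab
          simp only [ne_eq, Prod.ext_iff, not_and] at hab ⊢
          omega
        · -- leg2 vs inner
          intro a ha b hb
          rw [legD_two] at ha
          simp only [List.mem_map, List.mem_range] at ha hb
          obtain ⟨j, hj, rfl⟩ := ha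
          obtain ⟨u, hu, rfl⟩ := hb
          obtain ⟨h1, h2, h3, h4⟩ := ihb u hu
          simp only [ne_eq, Prod.ext_iff, not_and]
          omega
        · -- leg1 vs (leg2 ++ inner)
          intro a ha b hb
          rw [legD_one] at ha
          simp only [List.mem_append, legD_two, List.mem_map, List.mem_range] at ha hb
          obtain ⟨j, hj, rfl⟩ := ha
          rcases hb with ⟨u, hu, rfl⟩ | ⟨u, hu, rfl⟩
          · simp only [ne_eq, Prod.ext_iff, not_and]; push_cast; omega
          · obtain ⟨h1, h2, h3, h4⟩ := ihb u hu
            simp only [ne_eq, Prod.ext_iff, not_and]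
            push_cast
            omega
        · -- leg0 vs rest
          intro a ha b hb
          rw [legD_zero] at ha
          simp only [List.mem_append, legD_one, legD_two, List.mem_map, List.mem_range] at ha hb
          obtain ⟨j, hj, rfl⟩ := ha
          rcases hb with ⟨u, hu, rfl⟩ | ⟨u, hu, rfl⟩ | ⟨u, hu, rfl⟩
          · simp only [ne_eq, Prod.ext_iff, not_and]; push_cast; omega
          · simp only [ne_eq, Prod.ext_iff, not_and]; push_cast; omega
          · obtain ⟨h1, h2, h3, h4⟩ := ihb u hu
            simp only [ne_eq, Prod.ext_iff, not_and]
            push_cast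
            omega

-- matrix entries after all writes = association lookup
theorem entry_writeA (M : List (List Int)) (N : Nat) (t : Int × Int × Int) (r c : Int)
    (hM : M.length = N) (hrow : ∀ row ∈ M, row.length = N)
    (ht1 : 0 ≤ t.1) (ht1' : t.1 < (N : Int)) (ht2 : 0 ≤ t.2.1) (ht2' : t.2.1 < (N : Int))
    (hr : 0 ≤ r) (hc : 0 ≤ c) :
    entry (writeA M t) r c = if r = t.1 ∧ c = t.2.1 then t.2.2 else entry M r c := by
  obtain ⟨p, q, v⟩ := t
  simp only [writeA, entry] at *
  have hpl : p.toNat < M.length := by omega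
  rw [show p = ((p.toNat : Nat) : Int) by omega, show q = ((q.toNat : Nat) : Int) by omega,
    show r = ((r.toNat : Nat) : Int) by omega, show c = ((c.toNat : Nat) : Int) by omega]
  rw [PySem.List.pyGetD_pySetD_natCast M p.toNat r.toNat _ _ hpl]
  have hrowlen : (PySem.List.pyGetD M ((p.toNat : Nat) : Int) []).length = N := by
    rw [PySem.List.pyGetD_natCast, List.getD_eq_getElem _ _ hpl]
    exact hrow _ (List.getElem_mem hpl)
  by_cases h1 : r.toNat = p.toNat
  · rw [if_pos h1]
    rw [PySem.List.pyGetD_pySetD_natCast _ q.toNat c.toNat _ _ (by rw [hrowlen]; omega)]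
    by_cases h2 : c.toNat = q.toNat
    · rw [if_pos h2, if_pos ⟨by exact_mod_cast h1, by exact_mod_cast h2⟩]
    · rw [if_neg h2, if_neg (by rintro ⟨ha, hb⟩; exact h2 (by omega))]
      rw [show p.toNat = r.toNat from h1.symm]
  · rw [if_neg h1]
    rw [if_neg (by rintro ⟨ha, hb⟩; exact h1 (by omega))]

theorem shape_writeA (M : List (List Int)) (N : Nat) (t : Int × Int × Int)
    (hM : M.length = N) (hrow : ∀ row ∈ M, row.length = N)
    (ht1 : 0 ≤ t.1) (ht1' : t.1 < (N : Int)) :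
    (writeA M t).length = N ∧ ∀ row ∈ writeA M t, row.length = N := by
  obtain ⟨p, q, v⟩ := t
  simp only [writeA] at *
  rw [PySem.List.pySetD_of_nonneg _ _ ht1]
  refine ⟨by simp [hM], ?_⟩
  intro row hrw
  rcases List.mem_or_eq_of_mem_set hrw with h | h
  · exact hrow _ h
  · subst h
    rw [PySem.List.length_pySetD]
    have hpl : p.toNat < M.length := by omega
    rw [show p = ((p.toNat : Nat) : Int) by omega, PySem.List.pyGetD_natCast,
      List.getD_eq_getElem _ _ hpl]
    exact hrow _ (List.getElem_mem hpl)

theorem entry_foldl (N : Nat) : ∀ (S : List (Int × Int × Int)) (M : List (List Int)),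
    M.length = N → (∀ row ∈ M, row.length = N) →
    (∀ t ∈ S, 0 ≤ t.2.1 ∧ t.2.1 ≤ t.1 ∧ t.1 < (N : Int) ∧ 1 ≤ t.2.2) →
    S.Pairwise (fun a b => (a.1, a.2.1) ≠ (b.1, b.2.1)) →
    ∀ (r c : Int), 0 ≤ r → 0 ≤ c →
    entry (List.foldl writeA M S) r c =
      (match kfind S r c with | some t => t.2.2 | none => entry M r c) := by
  intro S
  induction S with
  | nil => intro M _ _ _ _ r c _ _; simp [kfind]
  | cons t S' ih =>
    intro M hM hrow hb hpw r c hr hc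
    have hbt := hb t (by simp)
    obtain ⟨hsh1, hsh2⟩ := shape_writeA M N t hM hrow (by omega) hbt.2.2.1
    simp only [List.foldl_cons]
    rw [ih (writeA M t) hsh1 hsh2 (fun u hu => hb u (by simp [hu]))
      (List.Pairwise.sublist (List.sublist_cons_self t S') hpw) r c hr hc]
    have hkey : ∀ u ∈ S', (t.1, t.2.1) ≠ (u.1, u.2.1) := (List.pairwise_cons.mp hpw).1
    by_cases h1 : (t.1 == r && t.2.1 == c) = true
    · have hkt : t.1 = r ∧ t.2.1 = c := by simpa using h1
      have hnone : kfind S' r c = none := by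
        simp only [kfind]
        rw [List.find?_eq_none]
        intro u hu hpred
        have : u.1 = r ∧ u.2.1 = c := by simpa using hpred
        exact hkey u hu (by simp [hkt.1, hkt.2, this.1, this.2])
      rw [hnone, show kfind (t :: S') r c = some t from by
        simp [kfind, h1]]
      rw [entry_writeA M N t r c hM hrow (by omega) hbt.2.2.1 (by omega)
        (by omega) hr hc, if_pos ⟨hkt.1.symm, hkt.2.symm⟩]
    · have hcons : kfind (t :: S') r c = kfind S' r c := by
        simp only [kfind]
        exact List.find?_cons_of_neg (by simpa using h1)
      rw [hcons]
      cases hf : kfind S' r c with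
      | some u => rfl
      | none =>
        rw [entry_writeA M N t r c hM hrow (by omega) hbt.2.2.1 (by omega)
          (by omega) hr hc, if_neg (by rintro ⟨ha, hb2⟩; simp [ha, hb2] at h1)]

theorem entry_matrix0 (n : Int) (r c : Int) :
    entry ((PySem.List.pyRange 0 n).map (fun _ => (PySem.List.pyRange 0 n).map (fun _ => (0 : Int)))) r c = 0 := by
  have hmem : ∀ (xs : List (List Int)) (i : Int) (row : List Int),
      PySem.List.pyGet? xs i = some row → row ∈ xs := by
    intro xs i row h
    simp only [PySem.List.pyGet?, Option.bind_eq_some_iff] at h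
    obtain ⟨k, _, hk⟩ := h
    exact List.mem_of_getElem? hk
  have hrow0 : ∀ (row : List Int), (∀ z ∈ row, z = 0) →
      PySem.List.pyGetD row c 0 = 0 := by
    intro row hz
    simp only [PySem.List.pyGetD]
    cases h : PySem.List.pyGet? row c with
    | none => rfl
    | some z =>
      have hm : ∀ (xs : List Int) (i : Int) (z : Int),
          PySem.List.pyGet? xs i = some z → z ∈ xs := by
        intro xs i z h
        simp only [PySem.List.pyGet?, Option.bind_eq_some_iff] at h
        obtain ⟨k, _, hk⟩ := h
        exact List.mem_of_getElem? hk
      exact hz z (hm _ _ _ h)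
  simp only [entry, PySem.List.pyGetD]
  cases h : PySem.List.pyGet?
      ((PySem.List.pyRange 0 n).map (fun _ => (PySem.List.pyRange 0 n).map (fun _ => (0 : Int)))) r with
  | none =>
    simpa using hrow0 [] (by simp)
  | some row =>
    have := hmem _ _ _ h
    simp only [List.mem_map] at this
    obtain ⟨_, _, hrw⟩ := this
    refine hrow0 row ?_
    rw [← hrw]
    intro z hz
    obtain ⟨a, -, hza⟩ := List.mem_map.mp hz
    rw [← hza]

-- row-major lookup over distinct covered cells is a permutation of the triples
theorem perm_filterMap_kfind : ∀ (cells : List (Int × Int)) (S : List (Int × Int × Int)),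
    cells.Nodup →
    S.Pairwise (fun a b => (a.1, a.2.1) ≠ (b.1, b.2.1)) →
    (∀ t ∈ S, (t.1, t.2.1) ∈ cells) →
    (cells.filterMap (fun rc => kfind S rc.1 rc.2)).Perm S := by
  intro cells
  induction cells with
  | nil =>
    intro S _ _ hcov
    cases S with
    | nil => simp
    | cons s S' => exact absurd (hcov s (by simp)) (by simp)
  | cons rc rest ih =>
    intro S hnd hpw hcov
    have hnd' := List.nodup_cons.mp hnd
    cases hfind : kfind S rc.1 rc.2 with
    | none =>
      simp only [List.filterMap_cons, hfind]
      refine ih S hnd'.2 hpw ?_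
      intro t ht
      rcases List.mem_cons.mp (hcov t ht) with h | h
      · exfalso
        simp only [kfind] at hfind
        rw [List.find?_eq_none] at hfind
        exact hfind t ht (by simp [← h])
      · exact h
    | some u =>
      have hfind' : List.find? (fun t => t.1 == rc.1 && t.2.1 == rc.2) S = some u := hfind
      obtain ⟨hpred, as, bs, hS, has⟩ := List.find?_eq_some_iff_append.mp hfind' 
      have hkeyu : u.1 = rc.1 ∧ u.2.1 = rc.2 := by simpa using hpred
      subst hS
      rw [List.pairwise_append] at hpw
      obtain ⟨pw_as, pw_cons, cross⟩ := hpw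
      have hu_bs := (List.pairwise_cons.mp pw_cons).1
      have pw_bs := (List.pairwise_cons.mp pw_cons).2
      have hnokey : ∀ w ∈ as ++ bs, (w.1, w.2.1) ≠ (u.1, u.2.1) := by
        intro w hw
        rcases List.mem_append.mp hw with h | h
        · exact cross w h u (by simp)
        · exact (hu_bs w h).symm
      have hstep : (rest.filterMap (fun rc' => kfind (as ++ u :: bs) rc'.1 rc'.2)) =
          (rest.filterMap (fun rc' => kfind (as ++ bs) rc'.1 rc'.2)) := by
        apply List.filterMap_congr
        intro rc' hrc'
        have hne : rc' ≠ rc := fun h => hnd'.1 (h ▸ hrc')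
        simp only [kfind, List.find?_append]
        have : List.find? (fun t => t.1 == rc'.1 && t.2.1 == rc'.2) (u :: bs) =
            List.find? (fun t => t.1 == rc'.1 && t.2.1 == rc'.2) bs := by
          apply List.find?_cons_of_neg
          simp only [Bool.and_eq_true, beq_iff_eq, not_and]
          intro h1 h2
          exact hne (Prod.ext_iff.mpr ⟨by rw [← h1, hkeyu.1], by rw [← h2, hkeyu.2]⟩)
        rw [this]
      have hpw' : (as ++ bs).Pairwise (fun a b => (a.1, a.2.1) ≠ (b.1, b.2.1)) := by
        rw [List.pairwise_append]
        exact ⟨pw_as, pw_bs, fun a ha b hb => cross a ha b (by simp [hb])⟩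
      have hcov' : ∀ t ∈ as ++ bs, (t.1, t.2.1) ∈ rest := by
        intro t ht
        have htS : t ∈ as ++ u :: bs := by
          rcases List.mem_append.mp ht with h | h
          · exact List.mem_append.mpr (Or.inl h)
          · exact List.mem_append.mpr (Or.inr (by simp [h]))
        rcases List.mem_cons.mp (hcov t htS) with h | h
        · exact absurd (h.trans (Prod.ext_iff.mpr ⟨hkeyu.1.symm, hkeyu.2.symm⟩)) (hnokey t ht)
        · exact h
      have heq : List.filterMap (fun rc' => kfind (as ++ u :: bs) rc'.1 rc'.2) (rc :: rest)
          = u :: rest.filterMap (fun rc' => kfind (as ++ bs) rc'.1 rc'.2) := by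
        rw [List.filterMap_cons, hstep]
        simp only [hfind]
      rw [heq]
      exact ((ih (as ++ bs) hnd'.2 hpw' hcov').cons u).trans List.perm_middle.symm

-- per-row: filtering nonzero lookups = mapping the found triples' values
theorem row_lemma (S : List (Int × Int × Int)) (r : Int) (hv : ∀ t ∈ S, 1 ≤ t.2.2) :
    ∀ (cols : List Int),
    (cols.filter (fun c => !decide (look S r c = 0))).map (fun c => look S r c)
      = (cols.filterMap (fun c => kfind S r c)).map (fun t => t.2.2) := by
  intro cols
  induction cols with
  | nil => simp
  | cons c cols ih =>
    rw [List.filter_cons, List.filterMap_cons]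
    cases h : kfind S r c with
    | none =>
      have hl : look S r c = 0 := by simp [look, h]
      simpa [hl] using ih
    | some u =>
      have hu : u ∈ S := List.mem_of_find?_eq_some h
      have hl : look S r c = u.2.2 := by simp [look, h]
      have hv1 := hv u hu
      simp [hl, ih, show u.2.2 ≠ 0 by omega]

-- ===== VERDICT (by name: the statement is the Claim_ definition above) =====
theorem solution_spec : Claim_equal_solution := by
  intro n _
  unfold Spec_solution
  obtain ⟨eA, heA⟩ := A_outer n n.toNat 0 (by simp)
    ((PySem.List.pyRange 0 n).map (fun _ => (PySem.List.pyRange 0 n).map (fun _ => (0 : Int))))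
    (-1) 0 1
  obtain ⟨eB, heB⟩ := B_outer n n.toNat 0 (by simp) [] (-1) 0 1
  simp only [solution, solution_alt]
  rw [heA, heB]
  simp only [List.nil_append]
  set S := snail n.toNat 0 (-1) 0 1 with hSdef
  set M0 := (PySem.List.pyRange 0 n).map
      (fun _ => (PySem.List.pyRange 0 n).map (fun _ => (0 : Int))) with hM0def
  set F := List.foldl writeA M0 S with hFdef
  obtain ⟨hbound, hpw⟩ := snail_inv n.toNat
  have hM0len : M0.length = n.toNat := by
    rw [hM0def, List.length_map, PySem.List.length_pyRange_one]; omega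
  have hM0rows : ∀ row ∈ M0, row.length = n.toNat := by
    intro row hrw
    rw [hM0def] at hrw
    obtain ⟨_, -, rfl⟩ := List.mem_map.mp hrw
    rw [List.length_map, PySem.List.length_pyRange_one]; omega
  have hFentry : ∀ r c : Int, 0 ≤ r → 0 ≤ c →
      PySem.List.pyGetD (PySem.List.pyGetD F r []) c 0 = look S r c := by
    intro r c hr hc
    have := entry_foldl n.toNat S M0 hM0len hM0rows hbound hpw r c hr hc
    rw [entry] at this
    rw [hFdef, this]
    cases hf : kfind S r c with
    | none =>
      simp only [hf, look, Option.map_none, Option.getD_none]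
      rw [hM0def]
      exact entry_matrix0 n r c
    | some u => simp [look, hf]
  -- A's scan over the grid, rewritten to a flatMap of per-row lookups
  have hscan : List.foldl
      (fun acc i => List.foldl
        (fun acc j =>
          if PySem.List.pyGetD (PySem.List.pyGetD F i []) j 0 ≠ 0 then
            acc ++ [PySem.List.pyGetD (PySem.List.pyGetD F i []) j 0]
          else acc)
        acc (PySem.List.pyRange 0 n))
      [] (PySem.List.pyRange 0 n)
      = (PySem.List.pyRange 0 n).flatMap
        (fun i => ((PySem.List.pyRange 0 n).filter (fun j => !decide (look S i j = 0))).map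
          (fun j => look S i j)) := by
    have hfl := PySem.List.foldl_append_eq_flatMap
      (fun i => ((PySem.List.pyRange 0 n).filter (fun j => !decide (look S i j = 0))).map
        (fun j => look S i j)) (PySem.List.pyRange 0 n) []
    rw [List.nil_append] at hfl
    rw [← hfl]
    apply PySem.List.foldl_congr_mem
    intro acc i hi
    have hi' : 0 ≤ i := (PySem.List.mem_pyRange_one.mp hi).1
    rw [← PySem.List.foldl_append_if]
    apply PySem.List.foldl_congr_mem
    intro acc2 j hj
    have hj' : 0 ≤ j := (PySem.List.mem_pyRange_one.mp hj).1
    rw [hFentry i j hi' hj']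
    by_cases hz : look S i j = 0 <;> simp [hz]
  rw [hscan]
  have hvpos : ∀ t ∈ S, 1 ≤ t.2.2 := fun t ht => (hbound t ht).2.2.2
  rw [List.flatMap_congr (fun r _ => row_lemma S r hvpos (PySem.List.pyRange 0 n))]
  -- both sides are (map value) of the row-major list T
  rw [← List.map_flatMap]
  -- B's sort: identify sorted S with T
  have hTeq : (((PySem.List.pyRange 0 n).flatMap
        (fun r => (PySem.List.pyRange 0 n).map (fun c => (r, c)))).filterMap
        (fun rc => kfind S rc.1 rc.2))
      = (PySem.List.pyRange 0 n).flatMap (fun r => (PySem.List.pyRange 0 n).filterMap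
        (fun c => kfind S r c)) := by
    rw [List.filterMap_flatMap]
    apply List.flatMap_congr
    intro r _
    rw [List.filterMap_map]
    rfl
  have hcellslex : ((PySem.List.pyRange 0 n).flatMap
      (fun r => (PySem.List.pyRange 0 n).map (fun c => (r, c)))).Pairwise
      (fun a b : Int × Int => a.1 < b.1 ∨ (a.1 = b.1 ∧ a.2 < b.2)) := by
    rw [List.pairwise_flatMap]
    constructor
    · intro r _
      exact List.pairwise_map.mpr ((PySem.List.pairwise_lt_pyRange_one 0 n).imp
        (fun h => Or.inr ⟨rfl, h⟩))
    · refine (PySem.List.pairwise_lt_pyRange_one 0 n).imp ?_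
      intro r r' hrr x hx y hy
      obtain ⟨cx, -, rfl⟩ := List.mem_map.mp hx
      obtain ⟨cy, -, rfl⟩ := List.mem_map.mp hy
      exact Or.inl hrr
  have hcov : ∀ t ∈ S, (t.1, t.2.1) ∈ (PySem.List.pyRange 0 n).flatMap
      (fun r => (PySem.List.pyRange 0 n).map (fun c => (r, c))) := by
    intro t ht
    obtain ⟨h1, h2, h3, h4⟩ := hbound t ht
    refine List.mem_flatMap.mpr ⟨t.1, PySem.List.mem_pyRange_one.mpr ⟨by omega, by omega⟩, ?_⟩
    exact List.mem_map.mpr ⟨t.2.1, PySem.List.mem_pyRange_one.mpr ⟨by omega, by omega⟩, rfl⟩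
  have hperm : ((PySem.List.pyRange 0 n).flatMap
      (fun r => (PySem.List.pyRange 0 n).filterMap (fun c => kfind S r c))).Perm S := by
    rw [← hTeq]
    exact perm_filterMap_kfind _ S
      (List.Pairwise.imp (by rintro a b (h | ⟨h1, h2⟩) <;> simp [Prod.ext_iff] <;> omega)
        hcellslex)
      hpw hcov
  have hpwlt : ((PySem.List.pyRange 0 n).flatMap
      (fun r => (PySem.List.pyRange 0 n).filterMap (fun c => kfind S r c))).Pairwise
      (fun a b => a.1 * n + a.2.1 < b.1 * n + b.2.1) := by
    rw [← hTeq]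
    rw [List.pairwise_filterMap]
    refine hcellslex.imp ?_
    intro rc rc' hlex b hb b' hb'
    have hbS : b ∈ S := List.mem_of_find?_eq_some hb
    have hb'S : b' ∈ S := List.mem_of_find?_eq_some hb'
    have hkb : b.1 = rc.1 ∧ b.2.1 = rc.2 := by simpa using List.find?_some hb
    have hkb' : b'.1 = rc'.1 ∧ b'.2.1 = rc'.2 := by simpa using List.find?_some hb'
    obtain ⟨hb1, hb2, hb3, -⟩ := hbound b hbS
    obtain ⟨hb1', hb2', hb3', -⟩ := hbound b' hb'S
    have hbn : b.2.1 < n := by omega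
    have hbn' : 0 ≤ b'.2.1 := hb1'
    rcases hlex with h | ⟨h1, h2⟩
    · have hlt : b.1 < b'.1 := by omega
      have e1 : b.1 * n + b.2.1 < (b.1 + 1) * n := by
        rw [add_mul, one_mul]; linarith
      have e2 : (b.1 + 1) * n ≤ b'.1 * n :=
        mul_le_mul_of_nonneg_right (by omega) (by omega)
      linarith
    · have he : b.1 = b'.1 := by omega
      have hc : b.2.1 < b'.2.1 := by omega
      rw [he]
      omega
  rw [PySem.List.sorted_eq_of_perm_of_pairwise_lt S _ (fun t => t.1 * n + t.2.1) hperm hpwlt]
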